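-- pv_equiv track=rewrite | github.com/nrhawkins/qnano | src/python/qnano/amzn/log_files.py | reorder_log_entries
-- ===== SOURCE A (Python) =====
-- from collections import defaultdict
--
-- def reorder_log_entries(log_lines):
--
--     new_log = list()
--     log_numbers = list()
--     log_text = defaultdict(list)
--
--     for log_line in log_lines:
--         words = log_line.split(" ")
--         if len(words) >= 2:
--             if words[1].isnumeric():
--                 log_numbers.append(log_line)
--             else:
--                 index_log_body = log_line.find(" ") + 1
--                 log_text[log_line[index_log_body:]].append(words[0])
--         else:
--             # malformed log line, drop from the new log
--             pass
--
--     for log_body in sorted(list(log_text.keys())):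
--         log_ids = sorted(list(log_text[log_body]))
--         for log_id in log_ids:
--             new_log.append(log_id + " " + log_body)
--
--     new_log = new_log + log_numbers
--
--     return new_log
-- ===== SOURCE B (Python) =====
-- def reorder_log_entries(log_lines):
--     # One pass: keep digit-logs in order, collect letter-logs as (body, id) pairs;
--     # one composite tuple sort replaces the defaultdict grouping + nested sorts.
--     digit_logs = []
--     letter_pairs = []
--     for line in log_lines:
--         words = line.split(" ")
--         if len(words) < 2:
--             continue  # malformed, drop
--         if words[1].isnumeric():
--             digit_logs.append(line)
--         else:
--             sp = line.find(" ")
--             letter_pairs.append((line[sp + 1:], line[:sp]))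
--     letter_pairs.sort()
--     return [ident + " " + body for body, ident in letter_pairs] + digit_logs
-- ===== Notes on version B (the rewrite author's own statement) =====
-- stated objective: simpler
-- what changed: Replaces the defaultdict grouping with nested sorted-keys/sorted-ids loops by a single partition pass collecting (body, id) pairs and one composite tuple sort that reconstructs the lines.
import Mathlib
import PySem

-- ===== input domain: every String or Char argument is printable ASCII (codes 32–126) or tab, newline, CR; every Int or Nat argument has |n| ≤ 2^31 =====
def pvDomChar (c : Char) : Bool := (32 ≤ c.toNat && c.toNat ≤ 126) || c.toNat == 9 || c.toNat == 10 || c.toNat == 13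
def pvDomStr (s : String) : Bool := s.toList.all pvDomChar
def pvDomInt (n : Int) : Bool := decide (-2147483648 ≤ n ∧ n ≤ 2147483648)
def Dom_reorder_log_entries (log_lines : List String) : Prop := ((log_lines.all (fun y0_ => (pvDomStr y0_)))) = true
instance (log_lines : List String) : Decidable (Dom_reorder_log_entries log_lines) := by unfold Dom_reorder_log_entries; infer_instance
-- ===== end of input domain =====

-- B replaces A's defaultdict grouping + nested sorted-keys/sorted-ids loops by one partition
-- pass into digit-logs and (body, id) pairs followed by a single composite tuple sort (simpler).

-- ===== PORT A =====
def reorder_log_entries (log_lines : List String) : List String :=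
  -- loop: classify each line into log_numbers / log_text (defaultdict(list))
  let st := log_lines.foldl (fun (s : List String × PySem.Dict String (List String)) log_line =>
      let words := (PySem.Str.split? log_line " ").getD []   -- sep " " non-empty, split? is some
      if 2 ≤ words.length then
        if PySem.Str.strIsdigit (PySem.List.pyGetD words 1 "") then   -- isnumeric = isdigit on the ASCII domain
          (s.1 ++ [log_line], s.2)
        else
          let index_log_body := PySem.Str.find log_line " " + 1
          (s.1, s.2.modify (PySem.Str.slice log_line (some index_log_body) none) []
                  (· ++ [PySem.List.pyGetD words 0 ""]))
      else s)   -- malformed log line, drop from the new log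
    ([], PySem.Dict.empty)
  let new_log := (PySem.List.sorted st.2.keys (fun k => k)).foldl (fun acc log_body =>
      (PySem.List.sorted (st.2.getD log_body []) (fun k => k)).foldl
        (fun acc2 log_id => acc2 ++ [log_id ++ " " ++ log_body]) acc) []
  new_log ++ st.1

-- ===== PORT B =====
def reorder_log_entries_alt (log_lines : List String) : List String :=
  let st := log_lines.foldl (fun (s : List String × List (String × String)) line =>
      let words := (PySem.Str.split? line " ").getD []
      if words.length < 2 then s   -- malformed, drop
      else if PySem.Str.strIsdigit (PySem.List.pyGetD words 1 "") then
        (s.1 ++ [line], s.2)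
      else
        let sp := PySem.Str.find line " "
        (s.1, s.2 ++ [(PySem.Str.slice line (some (sp + 1)) none,
                       PySem.Str.slice line none (some sp))]))
    ([], [])
  -- letter_pairs.sort() sorts (body, id) tuples lexicographically
  (PySem.List.sorted2 st.2 Prod.fst Prod.snd).map (fun p => p.2 ++ " " ++ p.1) ++ st.1

-- ===== PRECONDITION & SPEC =====
def Spec_reorder_log_entries (log_lines : List String) (out : List String) : Prop := out = reorder_log_entries_alt log_lines
instance (log_lines : List String) (out : List String) : Decidable (Spec_reorder_log_entries log_lines out) := by unfold Spec_reorder_log_entries; infer_instance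

-- ===== CLAIM (what is proved, stated in full; the proofs are below) =====
def Claim_equal_reorder_log_entries : Prop := ∀ (log_lines : List String), Dom_reorder_log_entries log_lines → Spec_reorder_log_entries log_lines (reorder_log_entries log_lines)

-- ===== LEMMAS AND PROOFS =====

-- proof-side names for the expressions both ports share
def pvWords (l : String) : List String := (PySem.Str.split? l " ").getD []
def pvIsDig (l : String) : Bool := decide (2 ≤ (pvWords l).length) && PySem.Str.strIsdigit (PySem.List.pyGetD (pvWords l) 1 "")
def pvIsLet (l : String) : Bool := decide (2 ≤ (pvWords l).length) && !PySem.Str.strIsdigit (PySem.List.pyGetD (pvWords l) 1 "")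
def pvBody (l : String) : String := PySem.Str.slice l (some (PySem.Str.find l " " + 1)) none
def pvId (l : String) : String := PySem.Str.slice l none (some (PySem.Str.find l " "))
def pvW0 (l : String) : String := PySem.List.pyGetD (pvWords l) 0 ""
def pvPair (l : String) : String × String := (pvBody l, pvId l)

-- split(" ") yields head = the chars before the first space, and a non-trivial tail iff a space occurs
theorem pv_splitGo (l : List Char) : ∀ (fuel : Nat), l.length < fuel →
    ∀ (cur : List Char) (acc : List (List Char)),
    ∃ rest, PySem.Chars.splitOn.go [' '] fuel l cur acc
        = acc.reverse ++ (cur.reverse ++ l.takeWhile (· ≠ ' ')) :: rest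
      ∧ (rest = [] ↔ ' ' ∉ l) := by
  induction l with
  | nil =>
    intro fuel hf cur acc
    cases fuel with
    | zero => omega
    | succ n =>
      refine ⟨[], ?_, by simp⟩
      simp [PySem.Chars.splitOn.go]
  | cons c t ih =>
    intro fuel hf cur acc
    cases fuel with
    | zero => omega
    | succ fs =>
      by_cases hc : c = ' '
      · subst hc
        obtain ⟨rest', he, hr⟩ := ih fs (by simp at hf ⊢; omega) [] ((cur.reverse) :: acc)
        refine ⟨t.takeWhile (· ≠ ' ') :: rest', ?_, ?_⟩
        · simp [PySem.Chars.splitOn.go, List.isPrefixOf, he]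
        · simp
      · obtain ⟨rest, he, hr⟩ := ih fs (by simp at hf ⊢; omega) (c :: cur) acc
        refine ⟨rest, ?_, ?_⟩
        · simp [PySem.Chars.splitOn.go, List.isPrefixOf, Ne.symm hc, he, hc]
        · simp [hr]; intro _ h'; exact hc h'.symm

theorem pv_split_head (s : List Char) :
    ∃ rest, PySem.Chars.splitOn s [' '] = (s.takeWhile (· ≠ ' ')) :: rest ∧ (rest = [] ↔ ' ' ∉ s) := by
  obtain ⟨rest, he, hr⟩ := pv_splitGo s (s.length + 1) (by omega) [] []
  exact ⟨rest, by simpa [PySem.Chars.splitOn] using he, hr⟩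

-- find(" ") is the length of that head when a space occurs
theorem pv_findGo (l : List Char) : ∀ k : Nat, ' ' ∈ l →
    PySem.Chars.find.go [' '] l k = (k : Int) + (l.takeWhile (· ≠ ' ')).length := by
  induction l with
  | nil => simp
  | cons c t ih =>
    intro k h
    by_cases hc : c = ' '
    · subst hc
      simp [PySem.Chars.find.go, List.isPrefixOf]
    · have ht : ' ' ∈ t := by
        rcases h with h | h
        · exact absurd rfl hc
        · assumption
      rw [PySem.Chars.find.go]
      simp only [List.isPrefixOf]
      rw [if_neg (by simp; exact fun h' => hc h'.symm), ih (k + 1) ht,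
        List.takeWhile_cons_of_pos (by simp [hc])]
      simp
      ring

-- on well-formed lines, words[0] (A's id) is the slice before the first space (B's id)
theorem pv_id_eq_w0 (l : String) (h : 2 ≤ (pvWords l).length) : pvId l = pvW0 l := by
  obtain ⟨rest, hsp, hre⟩ := pv_split_head l.toList
  have hw : pvWords l = (PySem.Chars.splitOn l.toList [' ']).map String.ofList := rfl
  have hmem : ' ' ∈ l.toList := by
    by_contra hn
    rw [hw, hsp] at h
    have : rest = [] := hre.mpr hn
    simp [this] at h
  have hfind : PySem.Str.find l " " = ((l.toList.takeWhile (· ≠ ' ')).length : Int) := by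
    show PySem.Chars.find l.toList " ".toList = _
    have h1 : " ".toList = [' '] := rfl
    rw [h1]
    show PySem.Chars.find.go [' '] l.toList 0 = _
    rw [pv_findGo l.toList 0 hmem]
    simp
  rw [pvId, pvW0, hw, hsp, hfind]
  simp [PySem.Str.slice, PySem.Chars.slice,
    PySem.List.pyGetD, PySem.List.pyGet?, PySem.List.pyIdx?]
  congr 1
  exact (List.prefix_iff_eq_take.mp (List.takeWhile_prefix _)).symm

-- A's loop state in closed form
theorem pv_stA (log_lines : List String) :
    log_lines.foldl (fun (s : List String × PySem.Dict String (List String)) log_line =>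
      let words := (PySem.Str.split? log_line " ").getD []
      if 2 ≤ words.length then
        if PySem.Str.strIsdigit (PySem.List.pyGetD words 1 "") then
          (s.1 ++ [log_line], s.2)
        else
          let index_log_body := PySem.Str.find log_line " " + 1
          (s.1, s.2.modify (PySem.Str.slice log_line (some index_log_body) none) []
                  (· ++ [PySem.List.pyGetD words 0 ""]))
      else s) ([], PySem.Dict.empty)
    = (log_lines.filter pvIsDig,
       ((log_lines.filter pvIsLet).map pvPair).foldl
         (fun d p => d.modify p.1 [] (· ++ [p.2])) PySem.Dict.empty) := by
  have hstep : (fun (s : List String × PySem.Dict String (List String)) log_line =>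
      let words := (PySem.Str.split? log_line " ").getD []
      if 2 ≤ words.length then
        if PySem.Str.strIsdigit (PySem.List.pyGetD words 1 "") then
          (s.1 ++ [log_line], s.2)
        else
          let index_log_body := PySem.Str.find log_line " " + 1
          (s.1, s.2.modify (PySem.Str.slice log_line (some index_log_body) none) []
                  (· ++ [PySem.List.pyGetD words 0 ""]))
      else s)
      = (fun s line => (if pvIsDig line then s.1 ++ [line] else s.1,
          if pvIsLet line then s.2.modify (pvBody line) [] (· ++ [pvW0 line]) else s.2)) := by
    funext s line
    simp only [pvIsDig, pvIsLet, pvBody, pvW0, pvWords]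
    by_cases h2 : 2 ≤ ((PySem.Str.split? line " ").getD []).length
    · by_cases hd : PySem.Str.strIsdigit (PySem.List.pyGetD ((PySem.Str.split? line " ").getD []) 1 "") = true
      all_goals simp only [PySem.Str.strIsdigit_eq] at hd
      · simp [h2, hd]
      · simp [h2, hd]
    · simp [h2]
  rw [hstep, PySem.List.foldl_prod_mk (f := fun acc l => if pvIsDig l then acc ++ [l] else acc)
    (g := fun (d : PySem.Dict String (List String)) l => if pvIsLet l then d.modify (pvBody l) [] (· ++ [pvW0 l]) else d)]
  rw [PySem.List.foldl_append_if_eq_filter, PySem.List.foldl_if_eq_foldl_filter, List.foldl_map]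
  refine Prod.ext (by simp) ?_
  apply PySem.List.foldl_congr_mem
  intro acc l hl
  have h2 : 2 ≤ (pvWords l).length := by
    have := List.of_mem_filter hl
    simp [pvIsLet] at this
    exact this.1
  simp [pvPair, pv_id_eq_w0 l h2]

-- B's loop state in closed form
theorem pv_stB (log_lines : List String) :
    log_lines.foldl (fun (s : List String × List (String × String)) line =>
      let words := (PySem.Str.split? line " ").getD []
      if words.length < 2 then s
      else if PySem.Str.strIsdigit (PySem.List.pyGetD words 1 "") then
        (s.1 ++ [line], s.2)
      else
        let sp := PySem.Str.find line " "
        (s.1, s.2 ++ [(PySem.Str.slice line (some (sp + 1)) none,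
                       PySem.Str.slice line none (some sp))])) ([], [])
    = (log_lines.filter pvIsDig, (log_lines.filter pvIsLet).map pvPair) := by
  have hstep : (fun (s : List String × List (String × String)) line =>
      let words := (PySem.Str.split? line " ").getD []
      if words.length < 2 then s
      else if PySem.Str.strIsdigit (PySem.List.pyGetD words 1 "") then
        (s.1 ++ [line], s.2)
      else
        let sp := PySem.Str.find line " "
        (s.1, s.2 ++ [(PySem.Str.slice line (some (sp + 1)) none,
                       PySem.Str.slice line none (some sp))]))
      = (fun s line => (if pvIsDig line then s.1 ++ [line] else s.1,
          if pvIsLet line then s.2 ++ [pvPair line] else s.2)) := by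
    funext s line
    simp only [pvIsDig, pvIsLet, pvPair, pvBody, pvId, pvWords]
    by_cases h2 : 2 ≤ ((PySem.Str.split? line " ").getD []).length
    · have hlt : ¬ ((PySem.Str.split? line " ").getD []).length ≤ 1 := by omega
      by_cases hd : PySem.Str.strIsdigit (PySem.List.pyGetD ((PySem.Str.split? line " ").getD []) 1 "") = true
      all_goals simp only [PySem.Str.strIsdigit_eq] at hd
      · simp [h2, hd, hlt]
      · simp [h2, hd, hlt]
    · have hlt : ((PySem.Str.split? line " ").getD []).length ≤ 1 := by omega
      simp [h2, hlt]
  rw [hstep, PySem.List.foldl_prod_mk (f := fun acc l => if pvIsDig l then acc ++ [l] else acc)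
    (g := fun acc l => if pvIsLet l then acc ++ [pvPair l] else acc)]
  rw [PySem.List.foldl_append_if_eq_filter, PySem.List.foldl_append_if]
  simp

-- re-attaching the common key to a group's values gives back the group
theorem pv_filter_map_pair (P : List (String × String)) (b : String) :
    (P.filter (fun p => p.1 == b)).map (fun p => (b, p.2)) = P.filter (fun p => p.1 == b) := by
  apply List.map_congr_left ?_ |>.trans (List.map_id _)
  intro p hp
  have h1 : p.1 = b := by simpa using List.of_mem_filter hp
  rw [← h1]
  simp

-- flatMapping the per-key filters over distinct, complete keys is a permutation
theorem pv_perm_flatMap_filter {α β : Type} [BEq β] [LawfulBEq β] (f : α → β) :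
    ∀ (ks : List β) (xs : List α), ks.Nodup → (∀ x ∈ xs, f x ∈ ks) →
    (ks.flatMap (fun k => xs.filter (fun x => f x == k))).Perm xs := by
  intro ks
  induction ks with
  | nil =>
    intro xs _ hc
    have : xs = [] := List.eq_nil_iff_forall_not_mem.mpr (fun x hx => by simpa using hc x hx)
    simp [this]
  | cons k ks ih =>
    intro xs hnd hc
    rw [List.flatMap_cons]
    have hys : ∀ k' ∈ ks, xs.filter (fun x => f x == k')
        = (xs.filter (fun x => !(f x == k))).filter (fun x => f x == k') := by
      intro k' hk'
      rw [List.filter_filter]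
      apply List.filter_congr
      intro x _
      by_cases hfx : f x == k'
      · have hkk' : k' ≠ k := by
          intro e
          subst e
          exact (List.nodup_cons.mp hnd).1 hk'
        have hfk' : f x = k' := by simpa using hfx
        simp [hfk', hkk']
      · simp [hfx]
    have hflat : ks.flatMap (fun k' => xs.filter (fun x => f x == k'))
        = ks.flatMap (fun k' => (xs.filter (fun x => !(f x == k))).filter (fun x => f x == k')) := by
      simp only [List.flatMap_def]
      exact congrArg List.flatten (List.map_congr_left hys)
    rw [hflat]
    have hperm := ih (xs.filter (fun x => !(f x == k))) (List.nodup_cons.mp hnd).2 ?_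
    · exact (List.Perm.append_left _ hperm).trans (List.filter_append_perm _ xs)
    · intro x hx
      have hm := List.of_mem_filter hx
      have hin := hc x (List.mem_of_mem_filter hx)
      rcases List.mem_cons.mp hin with h | h
      · rw [h] at hm
        simp at hm
      · exact h

-- Python's tuple sort of pairs is the sort by the lexicographic key
theorem pv_sorted2_eq_sorted_toLex (xs : List (String × String)) :
    PySem.List.sorted2 xs Prod.fst Prod.snd = PySem.List.sorted xs (fun p => toLex p) := by
  show List.foldl _ [] xs = List.foldl _ [] xs
  have hb : (fun (a b : String × String) => decide (a.1 < b.1) || (!decide (b.1 < a.1) && decide (a.2 < b.2)))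
      = (fun (a b : String × String) => decide (toLex a < toLex b)) := by
    funext a b
    rcases lt_trichotomy a.1 b.1 with h | h | h
    · simp [h, Prod.Lex.lt_iff, not_lt_of_gt h]
    · simp [h, Prod.Lex.lt_iff]
    · simp [h, Prod.Lex.lt_iff, not_lt_of_gt h, ne_of_gt h]
  rw [hb]

-- A's sorted-keys / sorted-ids grouping equals the single composite sort
theorem pv_PA_eq (P : List (String × String)) :
    (PySem.List.sorted (PySem.Set.ofList (P.map Prod.fst)) (fun k => k)).flatMap
      (fun b => (PySem.List.sorted ((P.filter (fun p => p.1 == b)).map Prod.snd) (fun k => k)).map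
        (fun i => (b, i)))
    = PySem.List.sorted P (fun p => toLex p) := by
  set ks := PySem.List.sorted (PySem.Set.ofList (P.map Prod.fst)) (fun k => k) with hks
  set PA := ks.flatMap
      (fun b => (PySem.List.sorted ((P.filter (fun p => p.1 == b)).map Prod.snd) (fun k => k)).map
        (fun i => (b, i))) with hPA
  have hksnd : ks.Nodup := ((PySem.List.sorted_perm _ _ _).nodup_iff).mpr (PySem.Set.nodup_ofList _)
  have hkslt : ks.Pairwise (· < ·) := PySem.List.sorted_ofList_pairwise_lt _
  have hperm : PA.Perm P := by
    have h1 : PA.Perm (ks.flatMap (fun b => P.filter (fun p => p.1 == b))) := by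
      apply List.Perm.flatMap (List.Perm.refl ks)
      intro b _
      calc ((PySem.List.sorted ((P.filter (fun p => p.1 == b)).map Prod.snd) (fun k => k)).map
              (fun i => (b, i))).Perm
            (((P.filter (fun p => p.1 == b)).map Prod.snd).map (fun i => (b, i))) :=
          List.Perm.map _ (PySem.List.sorted_perm _ _ _)
        _ = (P.filter (fun p => p.1 == b)).map (fun p => (b, p.2)) := by rw [List.map_map]; rfl
        _ = P.filter (fun p => p.1 == b) := pv_filter_map_pair P b
    refine h1.trans (pv_perm_flatMap_filter Prod.fst ks P hksnd ?_)
    intro p hp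
    rw [hks, PySem.List.mem_sorted, PySem.Set.mem_ofList]
    exact List.mem_map_of_mem hp
  have hpw : PA.Pairwise (fun a b => (toLex a : Lex (String × String)) ≤ toLex b) := by
    rw [hPA, List.flatMap_def, List.pairwise_flatten]
    constructor
    · intro l hl
      rw [List.mem_map] at hl
      obtain ⟨b, _, rfl⟩ := hl
      apply List.Pairwise.map (R := fun (x y : String) => x ≤ y)
      · intro i j hij
        rw [Prod.Lex.le_iff]
        right
        exact ⟨rfl, hij⟩
      · exact PySem.List.sorted_pairwise _ _
    · apply List.Pairwise.map (R := fun (x y : String) => x < y)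
      · intro b1 b2 hb x hx y hy
        rw [List.mem_map] at hx hy
        obtain ⟨i, _, rfl⟩ := hx
        obtain ⟨j, _, rfl⟩ := hy
        rw [Prod.Lex.le_iff]
        left
        exact hb
      · exact hkslt
  exact PySem.List.eq_of_perm_of_pairwise_le_of_injective (fun p => toLex p)
    (Equiv.injective toLex)
    (hperm.trans (PySem.List.sorted_perm P (fun p => toLex p) false).symm)
    hpw
    (PySem.List.sorted_pairwise P (fun p => toLex p))

-- ===== VERDICT (by name: the statement is the Claim_ definition above) =====
theorem reorder_log_entries_spec : Claim_equal_reorder_log_entries := by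
  intro log_lines _
  unfold Spec_reorder_log_entries
  rw [reorder_log_entries, reorder_log_entries_alt]
  rw [pv_stA, pv_stB]
  set P := (log_lines.filter pvIsLet).map pvPair with hP
  congr 1
  have hkeys : (P.foldl (fun d p => d.modify p.1 [] (· ++ [p.2])) PySem.Dict.empty).keys
      = PySem.Set.ofList (P.map Prod.fst) := by
    rw [PySem.Dict.keys_foldl_modify_key P Prod.fst [] (fun _ p => (· ++ [p.2])) PySem.Dict.empty,
      PySem.Dict.keys_empty]
    exact (PySem.Set.ofList_eq_foldl _).symm
  have hgetD : ∀ b, (P.foldl (fun d p => d.modify p.1 [] (· ++ [p.2])) PySem.Dict.empty).getD b []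
      = (P.filter (fun p => p.1 == b)).map Prod.snd := by
    intro b
    rw [PySem.Dict.getD_foldl_modify_append, PySem.Dict.getD_empty]
    rfl
  rw [hkeys]
  have hinner : (fun (acc : List String) log_body =>
      (PySem.List.sorted ((P.foldl (fun d p => d.modify p.1 [] (· ++ [p.2])) PySem.Dict.empty).getD log_body []) (fun k => k)).foldl
        (fun acc2 log_id => acc2 ++ [log_id ++ " " ++ log_body]) acc)
      = (fun acc b => acc ++ (PySem.List.sorted ((P.filter (fun p => p.1 == b)).map Prod.snd) (fun k => k)).map
          (fun i => i ++ " " ++ b)) := by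
    funext acc b
    rw [hgetD b, PySem.List.foldl_append_singleton_eq_map]
  rw [hinner, PySem.List.foldl_append_eq_flatMap, List.nil_append]
  rw [pv_sorted2_eq_sorted_toLex, ← pv_PA_eq, List.map_flatMap]
  simp only [List.map_map]
  rfl
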